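-- pv_equiv track=rewrite | github.com/pizzaboynizza/class_whatever | code/michaelf/lab18v3.py | between_peaks
-- ===== SOURCE A (Python) =====
-- def peaks(x):
--     peaks = []
--     for i in range(1, len(x)-1):
--         if  x[i-1] < x[i] > x[i+1]:
--             if x[i] != max(x):
--                 peaks.append(i)
--     for i in range(len(x)):
--         if x[i] == max(x):
--             peaks.append(i)
--
--     return peaks
--
-- def between_peaks(x):
--     between_peaks = []
--     peak = peaks(x)
--     for i in range(len(x)):
--         for j in range(0, len(peak)-1):
--             if  peak[j] < i < peak[j+1]:
--                 between_peaks.append(i)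
--     return between_peaks
-- ===== SOURCE B (Python) =====
-- def _peaks(x):
--     if not x:
--         return []
--     m = max(x)
--     up = [i for i in range(1, len(x) - 1) if x[i - 1] < x[i] > x[i + 1] and x[i] != m]
--     return up + [i for i in range(len(x)) if x[i] == m]
--
--
-- def between_peaks(x):
--     peak = _peaks(x)
--     out = []
--     for a, b in zip(peak, peak[1:]):
--         out.extend(range(a + 1, b))
--     return sorted(out)
-- ===== Notes on version B (the rewrite author's own statement) =====
-- stated objective: faster
-- what changed: B computes max(x) once and, instead of testing every index i against every consecutive peak pair, extends the result with range(a+1,b) for each consecutive pair (a,b) of peaks and sorts the collected indices.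
import Mathlib
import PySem

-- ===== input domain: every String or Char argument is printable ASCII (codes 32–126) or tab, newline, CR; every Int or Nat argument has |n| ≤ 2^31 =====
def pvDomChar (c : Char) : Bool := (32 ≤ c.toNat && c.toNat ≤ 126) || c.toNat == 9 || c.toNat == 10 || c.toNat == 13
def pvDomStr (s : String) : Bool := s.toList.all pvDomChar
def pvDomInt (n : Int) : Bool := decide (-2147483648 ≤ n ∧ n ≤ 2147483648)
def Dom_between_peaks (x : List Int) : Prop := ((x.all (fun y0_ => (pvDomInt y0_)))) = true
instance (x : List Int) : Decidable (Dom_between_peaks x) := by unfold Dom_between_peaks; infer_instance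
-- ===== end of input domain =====

-- B collects range(a+1, b) for each consecutive peak pair (a, b) and sorts, instead of A's
-- per-index scan over all pairs; B also computes max(x) once (objective: faster).

-- max(x); both Pythons only evaluate it on a nonempty list, so the default is never the result
def pymax (x : List Int) : Int := (PySem.List.max? x (fun y => y)).getD 0

-- ===== PORT A =====
def peaksA (x : List Int) : List Int :=
  let p1 := (PySem.List.pyRange 1 ((x.length : Int) - 1) 1).foldl
    (fun acc i =>
      if PySem.List.pyGetD x (i-1) 0 < PySem.List.pyGetD x i 0 ∧ PySem.List.pyGetD x i 0 > PySem.List.pyGetD x (i+1) 0 then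
        if PySem.List.pyGetD x i 0 ≠ pymax x then acc ++ [i] else acc
      else acc) []
  (PySem.List.pyRange 0 (x.length : Int) 1).foldl
    (fun acc i => if PySem.List.pyGetD x i 0 = pymax x then acc ++ [i] else acc) p1

def between_peaks (x : List Int) : List Int :=
  let peak := peaksA x
  (PySem.List.pyRange 0 (x.length : Int) 1).foldl
    (fun acc i =>
      (PySem.List.pyRange 0 ((peak.length : Int) - 1) 1).foldl
        (fun acc2 j =>
          if PySem.List.pyGetD peak j 0 < i ∧ i < PySem.List.pyGetD peak (j+1) 0 then acc2 ++ [i] else acc2)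
        acc) []

-- ===== PORT B =====
def peaksB (x : List Int) : List Int :=
  if x = [] then []
  else
    let m := pymax x
    let up := (PySem.List.pyRange 1 ((x.length : Int) - 1) 1).filter
      (fun i => decide ((PySem.List.pyGetD x (i-1) 0 < PySem.List.pyGetD x i 0 ∧ PySem.List.pyGetD x i 0 > PySem.List.pyGetD x (i+1) 0) ∧ PySem.List.pyGetD x i 0 ≠ m))
    up ++ (PySem.List.pyRange 0 (x.length : Int) 1).filter (fun i => decide (PySem.List.pyGetD x i 0 = m))

def between_peaks_alt (x : List Int) : List Int :=
  let peak := peaksB x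
  let out := (peak.zip (PySem.List.slice peak (some 1) none)).foldl
    (fun acc ab => acc ++ PySem.List.pyRange (ab.1 + 1) ab.2 1) []
  PySem.List.sorted out (fun y => y)

-- ===== PRECONDITION & SPEC =====
def Spec_between_peaks (x : List Int) (out : List Int) : Prop := out = between_peaks_alt x
instance (x : List Int) (out : List Int) : Decidable (Spec_between_peaks x out) := by unfold Spec_between_peaks; infer_instance

-- ===== CLAIM (what is proved, stated in full; the proofs are below) =====
def Claim_equal_between_peaks : Prop := ∀ (x : List Int), Dom_between_peaks x → Spec_between_peaks x (between_peaks x)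

-- ===== LEMMAS AND PROOFS =====

-- the two peaks helpers agree
lemma peaksA_eq_peaksB (x : List Int) : peaksA x = peaksB x := by
  unfold peaksA peaksB
  by_cases hx : x = []
  · subst hx; decide
  · rw [if_neg hx]
    dsimp only
    have h1 : ∀ i ∈ PySem.List.pyRange 1 ((x.length : Int) - 1) 1, ∀ acc : List Int,
        (if PySem.List.pyGetD x (i-1) 0 < PySem.List.pyGetD x i 0 ∧ PySem.List.pyGetD x i 0 > PySem.List.pyGetD x (i+1) 0 then
          if PySem.List.pyGetD x i 0 ≠ pymax x then acc ++ [i] else acc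
        else acc)
        = (if (PySem.List.pyGetD x (i-1) 0 < PySem.List.pyGetD x i 0 ∧ PySem.List.pyGetD x i 0 > PySem.List.pyGetD x (i+1) 0) ∧ PySem.List.pyGetD x i 0 ≠ pymax x then acc ++ [i] else acc) := by
      intro i _ acc
      split_ifs <;> first | rfl | tauto
    rw [PySem.List.foldl_congr_mem' _ _ _ _ h1, PySem.List.foldl_append_ite_eq_filter,
      PySem.List.foldl_append_ite_eq_filter]
    simp only [List.nil_append]

-- every peak index is a valid index of x
lemma peaksB_bounds (x : List Int) : ∀ e ∈ peaksB x, 0 ≤ e ∧ e < (x.length : Int) := by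
  intro e he
  unfold peaksB at he
  by_cases hx : x = []
  · simp [hx] at he
  · simp only [if_neg hx, List.mem_append, List.mem_filter,
      PySem.List.mem_pyRange_one] at he
    rcases he with ⟨⟨h1, h2⟩, _⟩ | ⟨⟨h1, h2⟩, _⟩ <;> omega

-- filter-then-map-const as a flatMap
lemma filter_map_eq_flatMap {α β : Type} (p : α → Prop) [DecidablePred p] (f : α → β) (l : List α) :
    (l.filter (fun a => decide (p a))).map f = l.flatMap (fun a => if p a then [f a] else []) := by
  induction l with
  | nil => rfl
  | cons a t ih => by_cases h : p a <;> simp [h, ih]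

-- double flatMap swap, up to permutation
lemma flatMap_append_perm {α β : Type} (l : List α) (g h : α → List β) :
    (l.flatMap fun b => g b ++ h b).Perm (l.flatMap g ++ l.flatMap h) := by
  induction l with
  | nil => simp
  | cons a t ih =>
    simp only [List.flatMap_cons]
    refine ((ih.append_left _).trans ?_)
    simp only [List.append_assoc]
    exact (List.perm_append_comm_assoc _ _ _).append_left _

lemma flatMap_swap_perm {α β γ : Type} (l1 : List α) (l2 : List β) (f : α → β → List γ) :
    (l1.flatMap fun a => l2.flatMap fun b => f a b).Perm
      (l2.flatMap fun b => l1.flatMap fun a => f a b) := by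
  induction l1 with
  | nil => simp
  | cons a t ih =>
    simp only [List.flatMap_cons]
    refine List.Perm.trans ?_ (flatMap_append_perm l2 _ _).symm
    exact ih.append_left _

-- zip with the tail, as a map over indices
lemma zip_drop_nat (p : List Int) :
    p.zip (p.drop 1) = (List.range (p.length - 1)).map (fun k => (p.getD k 0, p.getD (k+1) 0)) := by
  induction p with
  | nil => rfl
  | cons a q ih =>
    cases q with
    | nil => rfl
    | cons b r =>
      have h : (b::r).zip r = (b::r).zip ((b::r).drop 1) := by
        rw [List.drop_one, List.tail_cons]
      simp only [List.drop_one, List.tail_cons, List.zip_cons_cons]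
      rw [h, ih]
      simp [List.range_succ_eq_map, List.map_map, Function.comp_def]

-- the same, over the Int index range A uses
lemma zip_drop_eq (p : List Int) :
    p.zip (p.drop 1)
      = (PySem.List.pyRange 0 ((p.length : Int) - 1) 1).map
          (fun j => (PySem.List.pyGetD p j 0, PySem.List.pyGetD p (j+1) 0)) := by
  rw [PySem.List.pyRange_zero, zip_drop_nat]
  have h : ((p.length : Int) - 1).toNat = p.length - 1 := by omega
  rw [h, List.map_map]
  refine List.map_congr_left (fun k _ => ?_)
  have hc : ((k : Int) + 1) = ((k + 1 : Nat) : Int) := by push_cast; ring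
  simp only [Function.comp_def]
  rw [hc]
  simp only [PySem.List.pyGetD_natCast]

-- filtering a [0,n) range by a < i < b (with 0 ≤ a, b ≤ n) is the range (a+1, b)
lemma range_filter_eq (n a b : Int) (ha : 0 ≤ a) (hb : b ≤ n) :
    (PySem.List.pyRange 0 n 1).filter (fun i => decide (a < i ∧ i < b))
      = PySem.List.pyRange (a+1) b 1 := by
  have nd1 : ((PySem.List.pyRange 0 n 1).filter (fun i => decide (a < i ∧ i < b))).Nodup :=
    (PySem.List.nodup_pyRange_one 0 n).filter _
  have nd2 := PySem.List.nodup_pyRange_one (a+1) b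
  have hperm : ((PySem.List.pyRange 0 n 1).filter (fun i => decide (a < i ∧ i < b))).Perm
      (PySem.List.pyRange (a+1) b 1) := by
    rw [List.perm_ext_iff_of_nodup nd1 nd2]
    intro v
    simp only [List.mem_filter, PySem.List.mem_pyRange_one, decide_eq_true_eq]
    omega
  refine hperm.eq_of_pairwise (le := (· < ·)) ?_ ?_ ?_
  · intro u v _ _ h1 h2
    exact absurd h2 (by omega)
  · exact (PySem.List.pairwise_lt_pyRange_one 0 n).filter _
  · exact PySem.List.pairwise_lt_pyRange_one (a+1) b

-- the core: A's double loop = sorted of B's per-pair ranges, for any valid peak list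
lemma core (p : List Int) (n : Int) (hp : ∀ e ∈ p, 0 ≤ e ∧ e < n) :
    (PySem.List.pyRange 0 n 1).foldl
      (fun acc i =>
        (PySem.List.pyRange 0 ((p.length : Int) - 1) 1).foldl
          (fun acc2 j =>
            if PySem.List.pyGetD p j 0 < i ∧ i < PySem.List.pyGetD p (j+1) 0 then acc2 ++ [i] else acc2)
          acc) []
    = PySem.List.sorted
        ((p.zip (p.drop 1)).foldl (fun acc ab => acc ++ PySem.List.pyRange (ab.1 + 1) ab.2 1) [])
        (fun y => y) := by
  -- B's raw list, as a flatMap over the index range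
  rw [PySem.List.foldl_append_eq_flatMap, zip_drop_eq p, List.flatMap_map]
  -- A's double loop, as a flatMap of filtered index lists
  simp only [PySem.List.foldl_append_ite, PySem.List.foldl_append_eq_flatMap, List.nil_append]
  -- per-pair ranges are filters of [0, n)
  have hcong : ∀ j ∈ PySem.List.pyRange 0 ((p.length : Int) - 1) 1,
      PySem.List.pyRange (PySem.List.pyGetD p j 0 + 1) (PySem.List.pyGetD p (j+1) 0) 1
        = (PySem.List.pyRange 0 n 1).filter
            (fun i => decide (PySem.List.pyGetD p j 0 < i ∧ i < PySem.List.pyGetD p (j+1) 0)) := by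
    intro j hj
    rw [PySem.List.mem_pyRange_one] at hj
    have hj1 : (0:Int) ≤ j := hj.1
    have hj2 : j < (p.length : Int) - 1 := hj.2
    have e1 : PySem.List.pyGetD p j 0 = p[j.toNat] := by
      apply PySem.List.pyGetD_eq_getElem <;> omega
    have e2 : PySem.List.pyGetD p (j+1) 0 = p[(j+1).toNat] := by
      apply PySem.List.pyGetD_eq_getElem <;> omega
    refine (range_filter_eq n _ _ ?_ ?_).symm
    · rw [e1]; exact (hp _ (List.getElem_mem _)).1
    · rw [e2]; exact le_of_lt (hp _ (List.getElem_mem _)).2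
  rw [List.flatMap_congr hcong]
  refine (PySem.List.sorted_id_eq_of_perm_of_pairwise _ _ ?_ ?_).symm
  · -- permutation: swap the two flatMaps
    have e1 : (PySem.List.pyRange 0 n 1).flatMap
          (fun i => ((PySem.List.pyRange 0 ((p.length : Int) - 1) 1).filter
              (fun j => decide (PySem.List.pyGetD p j 0 < i ∧ i < PySem.List.pyGetD p (j+1) 0))).map (fun _ => i))
        = (PySem.List.pyRange 0 n 1).flatMap
            (fun i => (PySem.List.pyRange 0 ((p.length : Int) - 1) 1).flatMap
              (fun j => if PySem.List.pyGetD p j 0 < i ∧ i < PySem.List.pyGetD p (j+1) 0 then [i] else [])) :=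
      List.flatMap_congr (fun i _ => filter_map_eq_flatMap _ (fun _ => i) _)
    have e2 : (PySem.List.pyRange 0 ((p.length : Int) - 1) 1).flatMap
          (fun j => (PySem.List.pyRange 0 n 1).filter
              (fun i => decide (PySem.List.pyGetD p j 0 < i ∧ i < PySem.List.pyGetD p (j+1) 0)))
        = (PySem.List.pyRange 0 ((p.length : Int) - 1) 1).flatMap
            (fun j => (PySem.List.pyRange 0 n 1).flatMap
              (fun i => if PySem.List.pyGetD p j 0 < i ∧ i < PySem.List.pyGetD p (j+1) 0 then [i] else [])) := by
      refine List.flatMap_congr (fun j _ => ?_)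
      rw [← List.map_id ((PySem.List.pyRange 0 n 1).filter _), filter_map_eq_flatMap]
      simp only [id]
    rw [e1, e2]
    exact flatMap_swap_perm _ _ _
  · -- A's result is nondecreasing
    rw [List.flatMap_def, List.pairwise_flatten]
    constructor
    · intro l hl
      obtain ⟨i, _, rfl⟩ := List.mem_map.mp hl
      rw [List.pairwise_map]
      exact List.pairwise_of_forall (fun _ _ => le_refl i)
    · rw [List.pairwise_map]
      refine (PySem.List.pairwise_lt_pyRange_one 0 n).imp ?_
      intro i1 i2 h12 u hu v hv
      obtain ⟨_, _, rfl⟩ := List.mem_map.mp hu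
      obtain ⟨_, _, rfl⟩ := List.mem_map.mp hv
      exact le_of_lt h12

-- ===== VERDICT (by name: the statement is the Claim_ definition above) =====
theorem between_peaks_spec : Claim_equal_between_peaks := by
  intro x _
  unfold Spec_between_peaks
  dsimp only [between_peaks, between_peaks_alt]
  rw [peaksA_eq_peaksB, PySem.List.slice_from_one, ← List.drop_one]
  exact core (peaksB x) (x.length : Int) (peaksB_bounds x)
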